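-- pv_equiv track=rewrite | github.com/perry-data/tcm-classic-rag | scripts/data_reconstruction_v2/run_phase4_8_post_cutover_stabilization.py | failure_code
-- ===== SOURCE A (Python) =====
-- from typing import Any, Iterable, Mapping
--
-- def failure_code(raw: Any) -> str:
--     if not raw:
--         return ""
--     text = str(raw)
--     for separator in [":", ";", "\n"]:
--         if separator in text:
--             text = text.split(separator, 1)[0]
--     return text[:80]
-- ===== SOURCE B (Python) =====
-- def failure_code(raw):
--     if not raw:
--         return ""
--     text = str(raw)
--     out = []
--     for ch in text:
--         if ch in ':;\n':
--             break
--         out.append(ch)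
--     return ''.join(out)[:80]
-- ===== Notes on version B (the rewrite author's own statement) =====
-- stated objective: simpler
-- what changed: B replaces A's three sequential split passes (one per separator, each building a new string) with a single left-to-right character scan that stops at the first occurrence of any separator.
import Mathlib
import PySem

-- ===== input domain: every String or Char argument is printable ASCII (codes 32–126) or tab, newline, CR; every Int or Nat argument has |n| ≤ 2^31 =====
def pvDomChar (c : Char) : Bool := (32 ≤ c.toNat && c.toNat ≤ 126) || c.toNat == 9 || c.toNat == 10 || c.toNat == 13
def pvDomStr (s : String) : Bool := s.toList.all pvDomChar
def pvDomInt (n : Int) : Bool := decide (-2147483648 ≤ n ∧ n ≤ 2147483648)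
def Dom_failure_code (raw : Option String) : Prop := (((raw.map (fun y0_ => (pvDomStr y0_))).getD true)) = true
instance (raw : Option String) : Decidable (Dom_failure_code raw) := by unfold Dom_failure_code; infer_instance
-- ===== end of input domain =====

-- B changes A's three sequential single-split passes into one character scan that
-- stops at the first separator; objective: simpler (one pass, same O(n) cost).

-- ===== PORT A =====
-- text.split(sep, 1)[0] for a single-character separator sep: the prefix of text
-- before the first occurrence of sep (the whole text if sep is absent) — exact,
-- hand-ported step for step.
def pvSplitFirst (c : Char) : List Char → List Char
  | [] => []
  | x :: xs => if x = c then [] else x :: pvSplitFirst c xs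

def failure_code (raw : Option String) : String :=
  match raw with
  | none => ""                                   -- 'if not raw: return ""'
  | some s =>
    if s.toList = [] then ""                     -- '' is falsy too
    else
      -- 'for separator in [":", ";", "\n"]: if separator in text: text = text.split(separator, 1)[0]'
      let text := [':', ';', '\n'].foldl
        (fun t c => if t.contains c then pvSplitFirst c t else t) s.toList
      -- 'return text[:80]'
      String.ofList (PySem.List.slice text none (some 80))

-- ===== PORT B =====
def failure_code_alt (raw : Option String) : String :=
  match raw with
  | none => ""
  | some s =>
    if s.toList = [] then ""
    else
      -- char loop with break on the first separator, then [:80]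
      let out := s.toList.takeWhile (fun ch => !([':', ';', '\n'].contains ch))
      String.ofList (PySem.List.slice out none (some 80))

-- ===== PRECONDITION & SPEC =====
def Spec_failure_code (raw : Option String) (out : String) : Prop := out = failure_code_alt raw
instance (raw : Option String) (out : String) : Decidable (Spec_failure_code raw out) := by unfold Spec_failure_code; infer_instance

-- ===== CLAIM (what is proved, stated in full; the proofs are below) =====
def Claim_equal_failure_code : Prop := ∀ (raw : Option String), Dom_failure_code raw → Spec_failure_code raw (failure_code raw)

-- ===== LEMMAS AND PROOFS =====

lemma pvSplitFirst_eq_takeWhile (c : Char) (t : List Char) :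
    pvSplitFirst c t = t.takeWhile (fun x => x ≠ c) := by
  induction t with
  | nil => rfl
  | cons x xs ih =>
    by_cases h : x = c <;> simp [pvSplitFirst, List.takeWhile, h, ih]

lemma takeWhile_of_not_contains (c : Char) (t : List Char) (h : t.contains c = false) :
    t.takeWhile (fun x => x ≠ c) = t := by
  apply List.takeWhile_eq_self_iff.mpr
  intro x hx
  simp only [List.contains_eq_mem] at h
  simp only [decide_eq_true_eq]
  intro hxc; subst hxc
  exact absurd hx (by simpa using h)

lemma step_eq_takeWhile (c : Char) (t : List Char) :
    (if t.contains c then pvSplitFirst c t else t) = t.takeWhile (fun x => x ≠ c) := by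
  cases h : t.contains c
  · rw [takeWhile_of_not_contains c t h]
    simp [h]
  · simp [h, pvSplitFirst_eq_takeWhile]


lemma foldl_eq_takeWhile (t : List Char) :
    [':', ';', '\n'].foldl (fun t c => if t.contains c then pvSplitFirst c t else t) t
      = t.takeWhile (fun ch => !([':', ';', '\n'].contains ch)) := by
  simp only [List.foldl, step_eq_takeWhile, List.takeWhile_takeWhile]
  congr 1
  funext x
  by_cases h1 : x = ':' <;> by_cases h2 : x = ';' <;> by_cases h3 : x = '\n' <;>
    simp [h1, h2, h3]

-- ===== VERDICT (by name: the statement is the Claim_ definition above) =====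
theorem failure_code_spec : Claim_equal_failure_code := by
  intro raw _
  unfold Spec_failure_code failure_code failure_code_alt
  match raw with
  | none => rfl
  | some s =>
    by_cases h : s.toList = []
    · simp [h]
    · simp only [h, foldl_eq_takeWhile]
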